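-- pv_equiv track=rewrite | github.com/vanlabs-dev/cstack | apps/signalguard-api/src/signalguard_api/logging_setup.py | _scrub_inline_kv
-- ===== SOURCE A (Python) =====
-- _REDACTED = "[redacted]"
--
-- def _scrub_inline_kv(msg: str, needle_lower: str) -> str:
--     """Replace ``header=<value>`` in a free-form log message with a redaction.
--
--     Case-insensitive on the header name, value runs to the next whitespace or
--     end of string. Keeps the rest of the message intact so log readers can
--     still correlate the surrounding context.
--     """
--     lowered = msg.lower()
--     out: list[str] = []
--     i = 0
--     while i < len(msg):
--         idx = lowered.find(needle_lower, i)
--         if idx == -1: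
--             out.append(msg[i:])
--             break
--         out.append(msg[i:idx])
--         end = idx + len(needle_lower)
--         while end < len(msg) and not msg[end].isspace():
--             end += 1
--         out.append(msg[idx : idx + len(needle_lower)] + _REDACTED)
--         i = end
--     return "".join(out)
-- ===== SOURCE B (Python) =====
-- import re
--
-- _REDACTED = "[redacted]"
--
--
-- def _scrub_inline_kv(msg: str, needle_lower: str) -> str:
--     """Regex form: let the regex engine find each ``needle`` occurrence in the
--     lowercased message together with its greedy non-whitespace value run, then
--     stitch the original-case text back together around the redaction marker."""
--     out: list[str] = []
--     last = 0
--     for m in re.finditer(re.escape(needle_lower) + r"\S*", msg.lower()):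
--         out.append(msg[last:m.start()])
--         out.append(msg[m.start():m.start() + len(needle_lower)] + _REDACTED)
--         last = m.end()
--     out.append(msg[last:])
--     return "".join(out)
-- ===== Notes on version B (the rewrite author's own statement) =====
-- stated objective: idiomatic
-- what changed: Replaces the manual index-advancing while-loop (lowered.find plus an inner whitespace scan) with re.finditer of the compiled pattern escape(needle)+\S* over the lowercased message, rebuilding the original-case text around the redaction markers from the match spans.
-- outside the precondition, e.g. on _scrub_inline_kv('ab', ''): A returns '[redacted]', B returns '[redacted][redacted]'
import Mathlib
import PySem

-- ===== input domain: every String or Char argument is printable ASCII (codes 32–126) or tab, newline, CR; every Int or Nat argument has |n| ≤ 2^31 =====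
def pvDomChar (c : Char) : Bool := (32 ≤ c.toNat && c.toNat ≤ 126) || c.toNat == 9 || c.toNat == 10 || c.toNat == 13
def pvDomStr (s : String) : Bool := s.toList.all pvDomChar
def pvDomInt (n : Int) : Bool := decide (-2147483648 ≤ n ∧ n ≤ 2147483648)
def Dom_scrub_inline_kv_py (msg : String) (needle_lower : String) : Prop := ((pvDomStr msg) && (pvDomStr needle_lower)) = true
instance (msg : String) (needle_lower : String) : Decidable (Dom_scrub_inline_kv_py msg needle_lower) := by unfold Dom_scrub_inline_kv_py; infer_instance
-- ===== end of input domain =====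

-- B replaces A's manual find/scan while-loop with a regex-engine traversal (re.finditer over the
-- lowercased message) and a rebuild from the match spans; objective: idiomatic, same cost.

-- the module constant _REDACTED = "[redacted]"
def RED_py : List Char := "[redacted]".toList

-- ===== PORT A =====
-- inner `while end < len(msg) and not msg[end].isspace(): end += 1`
def aEnd (msg : List Char) (e : Nat) : Nat :=
  if h : e < msg.length then
    if PySem.Chars.isspace msg[e] = false then aEnd msg (e + 1) else e
  else e
  termination_by msg.length - e
  decreasing_by omega

-- outer `while i < len(msg)` loop; fuel = len(msg)+1 iterations suffice since i strictly
-- increases each round for a nonempty needle (the empty needle is outside Pre_).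
def aLoop (msg lowered needle : List Char) : Nat → Nat → List (List Char) → List (List Char)
  | 0, _, out => out
  | fuel + 1, i, out =>
    if i < msg.length then
      if PySem.Chars.findFrom lowered needle (i : Int) = -1 then
        out ++ [PySem.List.slice msg (some (i : Int)) none]
      else
        aLoop msg lowered needle fuel
          (aEnd msg ((PySem.Chars.findFrom lowered needle (i : Int)).toNat + needle.length))
          (out ++ [PySem.List.slice msg (some (i : Int)) (some (PySem.Chars.findFrom lowered needle (i : Int))),
                   PySem.List.slice msg (some (PySem.Chars.findFrom lowered needle (i : Int)))
                     (some (PySem.Chars.findFrom lowered needle (i : Int) + (needle.length : Int))) ++ RED_py])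
    else out

def scrub_inline_kv_py (msg : String) (needle_lower : String) : String :=
  let m := msg.toList
  let lowered := PySem.Chars.lower m
  String.ofList (PySem.Chars.join [] (aLoop m lowered needle_lower.toList (m.length + 1) 0 []))

-- ===== PORT B =====
-- length of the greedy `\S*` run at position j of the lowered text
def bRun (lowered : List Char) (j : Nat) : Nat :=
  ((lowered.drop j).takeWhile (fun c => !PySem.Chars.isspace c)).length

-- hand port of re.finditer(re.escape(needle) + r"\S*", lowered): the engine tries the literal
-- needle at each position left to right; on a match it greedily takes the non-whitespace run and
-- resumes after it (non-overlapping). Exact for this pattern on the admitted inputs.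
def bMatches (needle lowered : List Char) : Nat → Nat → List (Nat × Nat)
  | 0, _ => []
  | fuel + 1, pos =>
    if pos ≤ lowered.length then
      if needle.isPrefixOf (lowered.drop pos) then
        (pos, pos + needle.length + bRun lowered (pos + needle.length)) ::
          bMatches needle lowered fuel (pos + needle.length + bRun lowered (pos + needle.length))
      else bMatches needle lowered fuel (pos + 1)
    else []

-- the `for m in …: out.append(msg[last:m.start()]); out.append(msg[m.start():…]+RED); last = m.end()`
-- loop followed by the trailing `out.append(msg[last:])`
def bBuild (msg : List Char) (nlen : Nat) : List (Nat × Nat) → Nat → List (List Char)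
  | [], last => [PySem.List.slice msg (some (last : Int)) none]
  | (s, e) :: ms, last =>
      PySem.List.slice msg (some (last : Int)) (some (s : Int)) ::
      (PySem.List.slice msg (some (s : Int)) (some ((s + nlen : Nat) : Int)) ++ RED_py) ::
      bBuild msg nlen ms e

def scrub_inline_kv_py_alt (msg : String) (needle_lower : String) : String :=
  let m := msg.toList
  let lowered := PySem.Chars.lower m
  String.ofList (PySem.Chars.join []
    (bBuild m needle_lower.toList.length
      (bMatches needle_lower.toList lowered (lowered.length + 1) 0) 0))

-- ===== PRECONDITION & SPEC =====
-- Pre_ excludes only the empty needle_lower, on which A loops forever as soon as msg contains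
-- whitespace and otherwise silently drops every non-whitespace run it matched — an accident of
-- its scan that no caller could want; B inserts a marker at every position there.
def Pre_scrub_inline_kv_py (msg : String) (needle_lower : String) : Prop :=
  needle_lower.toList ≠ []
instance (msg : String) (needle_lower : String) : Decidable (Pre_scrub_inline_kv_py msg needle_lower) := by unfold Pre_scrub_inline_kv_py; infer_instance

def pvWitness_scrub_inline_kv_py : String × String := ("token=abc ok", "token=")

def Spec_scrub_inline_kv_py (msg : String) (needle_lower : String) (out : String) : Prop := out = scrub_inline_kv_py_alt msg needle_lower
instance (msg : String) (needle_lower : String) (out : String) : Decidable (Spec_scrub_inline_kv_py msg needle_lower out) := by unfold Spec_scrub_inline_kv_py; infer_instance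

-- ===== CLAIM (what is proved, stated in full; the proofs are below) =====
def Claim_equal_scrub_inline_kv_py : Prop := ∀ (msg : String) (needle_lower : String), Dom_scrub_inline_kv_py msg needle_lower → Pre_scrub_inline_kv_py msg needle_lower → Spec_scrub_inline_kv_py msg needle_lower (scrub_inline_kv_py msg needle_lower)

-- ===== LEMMAS AND PROOFS =====

theorem join_nil_flatten (parts : List (List Char)) :
    PySem.Chars.join [] parts = parts.flatten := by
  induction parts with
  | nil => rfl
  | cons x xs ih =>
    cases xs with
    | nil => simp [PySem.Chars.join, List.intercalate]
    | cons y ys =>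
      simp only [PySem.Chars.join, List.intercalate] at ih ⊢
      simp [List.intersperse] at ih ⊢
      simpa using ih

theorem takeWhile_congr' {p q : Char → Bool} (h : ∀ c, p c = q c) (l : List Char) :
    l.takeWhile p = l.takeWhile q := by
  induction l with
  | nil => rfl
  | cons c cs ih => simp [List.takeWhile_cons, h c, ih]

theorem space_lowerChar (c : Char) :
    PySem.Chars.isspace (PySem.Chars.lowerChar c) = PySem.Chars.isspace c := by
  unfold PySem.Chars.lowerChar
  split
  · rename_i hu
    have hb : 65 ≤ c.toNat ∧ c.toNat ≤ 90 := by
      simpa [PySem.Chars.isupper, Char.le_def] using hu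
    have hv : (Char.ofNat (c.toNat + 32)).toNat = c.toNat + 32 := by
      have : (c.toNat + 32).isValidChar := by
        left; omega
      simp [Char.ofNat, this]
    obtain ⟨h1, h2⟩ := hb
    simp only [PySem.Chars.isspace, hv]
    rw [Bool.eq_iff_iff]
    simp only [Bool.or_eq_true, Bool.and_eq_true, decide_eq_true_eq]
    omega
  · rfl

theorem length_lower (m : List Char) : (PySem.Chars.lower m).length = m.length := by
  simp [PySem.Chars.lower]

theorem bRun_eq (m : List Char) (j : Nat) :
    bRun (PySem.Chars.lower m) j
      = ((m.drop j).takeWhile (fun c => !PySem.Chars.isspace c)).length := by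
  unfold bRun
  rw [PySem.Chars.lower, ← List.map_drop, List.takeWhile_map]
  rw [takeWhile_congr' (p := (fun c => !PySem.Chars.isspace c) ∘ PySem.Chars.lowerChar)
        (q := fun c => !PySem.Chars.isspace c) (fun c => by simp [space_lowerChar c])]
  simp

theorem aEnd_eq (m : List Char) (e : Nat) :
    aEnd m e = e + ((m.drop e).takeWhile (fun c => !PySem.Chars.isspace c)).length := by
  rw [aEnd]
  split
  · rename_i h
    split
    · rename_i hsp
      rw [aEnd_eq m (e + 1), List.drop_eq_getElem_cons h, List.takeWhile_cons]
      rw [if_pos (by simp [hsp])]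
      simp; omega
    · rename_i hsp
      rw [List.drop_eq_getElem_cons h, List.takeWhile_cons]
      have : PySem.Chars.isspace m[e] = true := by
        revert hsp; cases PySem.Chars.isspace m[e] <;> simp
      simp [this]
  · rename_i h
    rw [List.drop_eq_nil_of_le (by omega)]
    simp
  termination_by m.length - e
  decreasing_by omega

theorem aEnd_le (m : List Char) (e : Nat) (h : e ≤ m.length) : aEnd m e ≤ m.length := by
  rw [aEnd_eq]
  have h1 := (List.takeWhile_sublist (l := m.drop e) (fun c => !PySem.Chars.isspace c)).length_le
  simp [List.length_drop] at h1
  omega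

theorem bMatches_gt (n lowered : List Char) (fuel pos : Nat) (h : lowered.length < pos) :
    bMatches n lowered fuel pos = [] := by
  cases fuel with
  | zero => rfl
  | succ f =>
    have hc : ¬ pos ≤ lowered.length := by omega
    rw [bMatches, if_neg hc]

theorem isPrefixOf_nil_false (n : List Char) (hn : n ≠ []) : n.isPrefixOf ([] : List Char) = false := by
  cases n with
  | nil => exact absurd rfl hn
  | cons c cs => rfl

-- the run after a successful match stays within the string
theorem matchEnd_le (n lowered : List Char) (pos : Nat) (hpos : pos ≤ lowered.length)
    (hp : n.isPrefixOf (lowered.drop pos) = true) :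
    pos + n.length + bRun lowered (pos + n.length) ≤ lowered.length := by
  have hpre : n <+: lowered.drop pos := List.isPrefixOf_iff_prefix.mp hp
  have h1 : n.length ≤ lowered.length - pos := by
    have := hpre.length_le
    simpa [List.length_drop] using this
  have h2 := (List.takeWhile_sublist (l := lowered.drop (pos + n.length))
      (fun c => !PySem.Chars.isspace c)).length_le
  simp only [List.length_drop] at h2
  unfold bRun
  omega

theorem bMatches_fuel (n lowered : List Char) (hn : n ≠ []) (fuel1 fuel2 pos : Nat)
    (h1 : lowered.length - pos < fuel1) (h2 : lowered.length - pos < fuel2) :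
    bMatches n lowered fuel1 pos = bMatches n lowered fuel2 pos := by
  cases fuel1 with
  | zero => omega
  | succ f1 =>
    cases fuel2 with
    | zero => omega
    | succ f2 =>
      rw [bMatches, bMatches]
      by_cases hpos : pos ≤ lowered.length
      · rw [if_pos hpos, if_pos hpos]
        by_cases hp : n.isPrefixOf (lowered.drop pos) = true
        · rw [if_pos hp, if_pos hp]
          have hne : 0 < n.length := by cases n with
            | nil => exact absurd rfl hn
            | cons c cs => simp
          have hle := matchEnd_le n lowered pos hpos hp
          have hlt : pos < pos + n.length + bRun lowered (pos + n.length) := by omega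
          rw [bMatches_fuel n lowered hn f1 f2 _ (by omega) (by omega)]
        · rw [if_neg hp, if_neg hp]
          by_cases hlt : pos < lowered.length
          · rw [bMatches_fuel n lowered hn f1 f2 (pos + 1) (by omega) (by omega)]
          · have : lowered.length < pos + 1 := by omega
            rw [bMatches_gt n lowered f1 _ this, bMatches_gt n lowered f2 _ this]
      · rw [if_neg hpos, if_neg hpos]
  termination_by lowered.length + 1 - pos
  decreasing_by all_goals omega

theorem bMatches_skip (n lowered : List Char) (hn : n ≠ []) (pos p fuel : Nat)
    (hpp : pos ≤ p) (hpl : p ≤ lowered.length)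
    (hno : ∀ t, pos ≤ t → t < p → ¬ n <+: lowered.drop t)
    (hf : lowered.length - pos < fuel) :
    bMatches n lowered fuel pos = bMatches n lowered (lowered.length - p + 1) p := by
  by_cases heq : pos = p
  · subst heq
    exact bMatches_fuel n lowered hn fuel _ pos hf (by omega)
  · have hlt : pos < p := by omega
    cases fuel with
    | zero => omega
    | succ f =>
      rw [bMatches, if_pos (by omega)]
      have hp : n.isPrefixOf (lowered.drop pos) = false := by
        cases h : n.isPrefixOf (lowered.drop pos)
        · rfl
        · exact absurd (List.isPrefixOf_iff_prefix.mp h) (hno pos le_rfl hlt)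
      rw [if_neg (by simp [hp])]
      exact bMatches_skip n lowered hn (pos + 1) p f (by omega) hpl
        (fun t ht1 ht2 => hno t (by omega) ht2) (by omega)
  termination_by p - pos

-- a prefix of a later drop is an infix of an earlier drop
theorem prefix_drop_infix (n lowered : List Char) (i t : Nat) (hit : i ≤ t)
    (h : n <+: lowered.drop t) : n <:+: lowered.drop i := by
  have : lowered.drop t = (lowered.drop i).drop (t - i) := by
    rw [List.drop_drop]; congr 1; omega
  rw [this] at h
  obtain ⟨r, hr⟩ := h
  refine ⟨(lowered.drop i).take (t - i), r, ?_⟩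
  rw [List.append_assoc, hr, List.take_append_drop]

-- MAIN LEMMA: from any loop entry point i (= the previous match end), A's interleaved
-- find/scan/append loop and B's match-list + rebuild produce the same pieces.
theorem mainEq (m n : List Char) (hn : n ≠ []) (i fuelA fuelB : Nat) (out : List (List Char))
    (hi : i ≤ m.length) (hA : m.length - i < fuelA) (hB : m.length - i < fuelB) :
    (aLoop m (PySem.Chars.lower m) n fuelA i out).flatten
      = out.flatten
        ++ (bBuild m n.length (bMatches n (PySem.Chars.lower m) fuelB i) i).flatten := by
  have hL : (PySem.Chars.lower m).length = m.length := length_lower m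
  have hn1 : 0 < n.length := by
    cases n with
    | nil => exact absurd rfl hn
    | cons c cs => simp
  cases fuelA with
  | zero => omega
  | succ fA =>
    rw [aLoop]
    by_cases him : i < m.length
    · rw [if_pos him]
      have hiL : i ≤ (PySem.Chars.lower m).length := by omega
      by_cases hidx : PySem.Chars.findFrom (PySem.Chars.lower m) n (i : Int) = -1
      · -- no further occurrence: A appends the tail, B has no matches left
        rw [if_pos hidx]
        have hninf : ¬ n <:+: (PySem.Chars.lower m).drop i :=
          (PySem.Chars.findFrom_natCast_eq_neg_one_iff _ n i hiL).mp hidx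
        have hno : ∀ t, i ≤ t → t < m.length → ¬ n <+: (PySem.Chars.lower m).drop t := by
          intro t ht1 _ hpre
          exact hninf (prefix_drop_infix n _ i t ht1 hpre)
        rw [bMatches_skip n _ hn i m.length fuelB hi (by omega) hno (by omega)]
        rw [show (PySem.Chars.lower m).length - m.length + 1 = 0 + 1 by omega]
        have hc1 : m.length ≤ (PySem.Chars.lower m).length := by omega
        have hc2 : n.isPrefixOf ((PySem.Chars.lower m).drop m.length) = false := by
          rw [List.drop_eq_nil_of_le (by omega)]
          exact isPrefixOf_nil_false n hn
        rw [bMatches, if_pos hc1, if_neg (by simp [hc2])]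
        rw [show bMatches n (PySem.Chars.lower m) 0 (m.length + 1) = [] from rfl]
        simp [bBuild]
      · -- a match at p = idx.toNat
        rw [if_neg hidx]
        have hspec := PySem.Chars.findFrom_natCast_spec (PySem.Chars.lower m) n i hiL hidx
        have hidx0 : 0 ≤ PySem.Chars.findFrom (PySem.Chars.lower m) n (i : Int) :=
          le_trans (by positivity) hspec.1
        obtain ⟨p, hcast⟩ : ∃ p : Nat,
            PySem.Chars.findFrom (PySem.Chars.lower m) n (i : Int) = (p : Int) :=
          ⟨_, (Int.toNat_of_nonneg hidx0).symm⟩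
        rw [hcast] at hspec ⊢
        simp only [Int.toNat_natCast] at hspec ⊢
        obtain ⟨hge, hpre, hmin⟩ := hspec
        have hip : i ≤ p := by exact_mod_cast hge
        have hpn : p + n.length ≤ m.length := by
          have := hpre.length_le
          simp only [List.length_drop, hL] at this
          omega
        -- A's end-of-value index equals B's match end
        have he : aEnd m (p + n.length)
            = p + n.length + bRun (PySem.Chars.lower m) (p + n.length) := by
          rw [aEnd_eq, bRun_eq]
        have heL : aEnd m (p + n.length) ≤ m.length := aEnd_le m (p + n.length) hpn
        have hie : i < aEnd m (p + n.length) := by omega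
        -- B: skip the non-matching positions, then read off the match
        have hp : n.isPrefixOf ((PySem.Chars.lower m).drop p) = true :=
          List.isPrefixOf_iff_prefix.mpr hpre
        rw [bMatches_skip n _ hn i p fuelB hip (by omega)
              (fun t ht1 ht2 => hmin t ht1 ht2) (by omega)]
        rw [show (PySem.Chars.lower m).length - p + 1
              = ((PySem.Chars.lower m).length - p) + 1 from rfl]
        rw [bMatches, if_pos (show p ≤ (PySem.Chars.lower m).length by omega), if_pos hp]
        rw [← he]
        rw [bMatches_fuel n _ hn ((PySem.Chars.lower m).length - p) fuelB (aEnd m (p + n.length))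
              (by omega) (by omega)]
        -- both sides now produce the same two pieces, then continue at the match end
        rw [mainEq m n hn (aEnd m (p + n.length)) fA fuelB _ heL (by omega) (by omega)]
        rw [show ((p : Int) + (n.length : Int)) = (((p + n.length : Nat)) : Int) by
              push_cast; ring]
        simp [bBuild, List.flatten_append, List.flatten_cons, List.append_assoc]
    · -- i = len(msg): A stops; B finds nothing
      rw [if_neg him]
      have him' : i = m.length := by omega
      cases fuelB with
      | zero => omega
      | succ fB =>
        have hc1 : i ≤ (PySem.Chars.lower m).length := by omega
        have hc2 : n.isPrefixOf ((PySem.Chars.lower m).drop i) = false := by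
          rw [List.drop_eq_nil_of_le (by omega)]
          exact isPrefixOf_nil_false n hn
        rw [bMatches, if_pos hc1, if_neg (by simp [hc2])]
        rw [bMatches_gt n _ fB (i + 1) (by omega)]
        have hs : PySem.List.slice m (some (i : Int)) none = m.drop i :=
          PySem.List.slice_from m (by positivity)
        simp [bBuild, hs, List.drop_eq_nil_of_le (le_of_eq him'.symm)]
  termination_by m.length - i
  decreasing_by omega

-- ===== VERDICT (by name: the statement is the Claim_ definition above) =====
theorem scrub_inline_kv_py_spec : Claim_equal_scrub_inline_kv_py := by
  intro msg needle_lower _ hpre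
  unfold Spec_scrub_inline_kv_py scrub_inline_kv_py scrub_inline_kv_py_alt
  simp only
  rw [join_nil_flatten, join_nil_flatten]
  congr 1
  have hL : (PySem.Chars.lower msg.toList).length = msg.toList.length := length_lower _
  have := mainEq msg.toList needle_lower.toList hpre 0 (msg.toList.length + 1)
    ((PySem.Chars.lower msg.toList).length + 1) [] (by omega) (by omega) (by omega)
  simpa using this
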